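/-
  SMOKE TESTS OF THE SEGMENT FAMILY OF compute_sorted_huffman (Vorbis/Spec/Codebook/SortedHuffman.lean): the assertions CHAIN (the
  composition unit is `ReachVia.trans` alone), and the facts of a cut point give the preconditions of the callees of the next
  segment (qsort, include_in_sort) in shape.
-/
import Vorbis.Spec.Units.compute_sorted_huffman_COMPOSITION
namespace Vorbis.Spec.SortedHuffman.Test
open X86 X86.User Asan

/-- The composition unit of compute_sorted_huffman is pure chaining: each segment's exit assertion IS the next one's entry
assertion, and segment 4 ends in the contract's `Returned`. -/
example : Vorbis.Spec.compute_sorted_huffman_COMPOSITION.Statement := by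
  intro Lay _ μ _ u₀ h1 h2 h3 h4 others frames Blk e ret he hpre
  refine (h1 others frames Blk ret e he hpre).trans ?_
  intro v hv
  refine (h2 others frames Blk ret e v hv).trans ?_
  intro w hw
  refine (h3 others frames Blk ret e w hw).trans ?_
  intro x hx
  exact h4 others frames Blk ret e x hx

/-- **qsort's precondition at its call in segment .2** (10B35CH: rdi = `c->sorted_codewords`, rsi = sext(se), edx = 4,
ecx = uint32_compare), from the facts of `AtSort`: the `se` records lie inside one live object (`pre.scLive`, read through
`fields`), `4·se < 2^63` because the range is live (inside the data space). -/
example {others : List Obj} {frames : List (Nat × FrameLayout)} {Blk : Block → Prop} {u₀ : State} {ret : Word}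
    {e v s : State} (h : Common others frames Blk u₀ ret e v) (hsh : ShadowPre others frames s)
    (hrdi : (s.reg .rdi).toNat = Codebook.sorted_codewords v.mem (e.reg .rdi).toNat)
    (hrsi : (s.reg .rsi).toNat = (Codebook.sorted_entries v.mem (e.reg .rdi).toNat).toNat)
    (hrdx : (s.reg .rdx).toNat = 4) (cmp : Word) (hrcx : s.reg .rcx = cmp) :
    (qsort.spec others frames cmp 4).pre s := by
  have hl := h.pre.scLive
  rw [← h.fields.sorted_codewords, ← h.fields.sorted_entries, ← hrdi, ← hrsi] at hl
  have hpos : 0 < 4 * (s.reg .rsi).toNat := by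
    have := h.pre.se_pos
    rw [← h.fields.sorted_entries] at this
    omega
  have hin := hl.inside hsh.inv hpos
  refine ⟨hsh, Or.inr ⟨hrcx, hrdx, by decide, ?_, hl⟩⟩
  omega

/-- **include_in_sort's precondition at its call in segment .3** (10B3EAH: rdi = rbp = c): `*c` inside one live object. -/
example {others : List Obj} {frames : List (Nat × FrameLayout)} {Blk : Block → Prop} {u₀ : State} {ret : Word}
    {e v s : State} (h : Common others frames Blk u₀ ret e v) (hsh : ShadowPre others frames s)
    (hrdi : s.reg .rdi = e.reg .rdi) : (include_in_sort.spec others frames).pre s := by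
  refine ⟨hsh, ?_⟩
  rw [hrdi]
  exact h.pre.bookLive

end Vorbis.Spec.SortedHuffman.Test
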